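-- pv_equiv track=rewrite | github.com/egdman/neat-lite | neat/genes.py | count_excess_disjoint
-- ===== SOURCE A (Python) =====
-- def count_excess_disjoint(pairs):
--     def consume_(lg, rg):
--         if lg is None:
--             n_unpaired = 1
--             for lg, rg in pairs:
--                 if lg is None:
--                     n_unpaired += 1
--                 else:
--                     return lg, rg, n_unpaired, True
--
--         elif rg is None:
--             n_unpaired = 1
--             for lg, rg in pairs:
--                 if rg is None:
--                     n_unpaired += 1
--                 else:
--                     return lg, rg, n_unpaired, True
--
--         else:
--             n_unpaired = 0
--             for lg, rg in pairs:
--                 if lg is None or rg is None: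
--                     return lg, rg, n_unpaired, True
--
--         return lg, rg, n_unpaired, False
--
--     pairs = iter(pairs)
--     try:
--         lg, rg = next(pairs)
--     except StopIteration:
--         return 0, 0
--
--     lg, rg, excess_num, has_more = consume_(lg, rg)
--     excess_tail = 0
--     disjoint_num = 0
--     while has_more:
--         disjoint_num += excess_tail
--         lg, rg, excess_tail, has_more = consume_(lg, rg)
--
--     return excess_num + excess_tail, disjoint_num
-- ===== SOURCE B (Python) =====
-- def count_excess_disjoint(pairs):
--     # One linear pass collecting the lengths of maximal runs of unpaired genes,
--     # then a closed-form combination: ends-touching runs are excess, interior runs disjoint.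
--     pairs = list(pairs)
--     runs = []
--     side, cur = 0, 0            # side: 0 idle, 1 left-gene-missing run, 2 right-gene-missing run
--     for lg, rg in pairs:
--         if side == 1 and lg is None:
--             cur += 1
--         elif side == 2 and rg is None:
--             cur += 1
--         else:
--             if side != 0:
--                 runs.append(cur)
--             if lg is None:
--                 side, cur = 1, 1
--             elif rg is None:
--                 side, cur = 2, 1
--             else:
--                 side, cur = 0, 0
--     if side != 0:
--         runs.append(cur)
--     if not runs:
--         return 0, 0
--     head = runs[0] if (pairs[0][0] is None or pairs[0][1] is None) else 0
--     tail = runs[-1] if side != 0 else 0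
--     if len(runs) == 1 and head != 0 and tail != 0:
--         return head, 0
--     return head + tail, sum(runs) - head - tail
-- ===== Notes on version B (the rewrite author's own statement) =====
-- stated objective: simpler
-- what changed: Replaces A's nested iterator-sharing consume_ loops (three inner for-loops over a shared iterator driven by an outer while) with a single flat pass that collects the lengths of maximal unpaired runs and then combines them by a closed formula (end-touching runs are excess, interior runs are disjoint).
import Mathlib
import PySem

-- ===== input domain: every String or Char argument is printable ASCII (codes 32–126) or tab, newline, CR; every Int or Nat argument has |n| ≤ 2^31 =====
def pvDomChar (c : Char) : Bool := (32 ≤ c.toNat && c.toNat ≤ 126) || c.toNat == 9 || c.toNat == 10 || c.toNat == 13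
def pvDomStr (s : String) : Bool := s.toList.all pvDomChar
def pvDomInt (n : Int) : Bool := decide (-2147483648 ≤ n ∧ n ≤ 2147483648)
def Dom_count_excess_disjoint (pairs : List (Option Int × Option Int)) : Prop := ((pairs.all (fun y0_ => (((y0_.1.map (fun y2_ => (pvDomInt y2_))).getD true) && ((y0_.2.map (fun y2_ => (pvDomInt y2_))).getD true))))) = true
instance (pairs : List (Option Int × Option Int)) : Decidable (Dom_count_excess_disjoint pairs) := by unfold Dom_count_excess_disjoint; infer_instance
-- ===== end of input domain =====

-- B is a single flat pass that records the lengths of maximal unpaired runs and combines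
-- them by a closed formula, instead of A's nested iterator-sharing consume_ loops.

-- ===== PORT A =====
-- the three for-loops of A's consume_ helper; the iterator becomes an explicit list that is
-- threaded through and returned (result: lg, rg, n_unpaired, has_more, remaining input)
def consumeL (lg rg : Option Int) (n : Int) :
    List (Option Int × Option Int) → Option Int × Option Int × Int × Bool × List (Option Int × Option Int)
  | [] => (lg, rg, n, false, [])
  | (l, r) :: rest => if l = none then consumeL l r (n + 1) rest else (l, r, n, true, rest)

def consumeR (lg rg : Option Int) (n : Int) :
    List (Option Int × Option Int) → Option Int × Option Int × Int × Bool × List (Option Int × Option Int)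
  | [] => (lg, rg, n, false, [])
  | (l, r) :: rest => if r = none then consumeR l r (n + 1) rest else (l, r, n, true, rest)

def consumeM (lg rg : Option Int) :
    List (Option Int × Option Int) → Option Int × Option Int × Int × Bool × List (Option Int × Option Int)
  | [] => (lg, rg, 0, false, [])
  | (l, r) :: rest => if l = none ∨ r = none then (l, r, 0, true, rest) else consumeM l r rest

def consumeA (lg rg : Option Int) (rest : List (Option Int × Option Int)) :
    Option Int × Option Int × Int × Bool × List (Option Int × Option Int) :=
  if lg = none then consumeL lg rg 1 rest
  else if rg = none then consumeR lg rg 1 rest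
  else consumeM lg rg rest

-- facts about consume_ the while-loop's termination needs (cited by decreasing_by)
theorem consumeL_spec : ∀ (rest : List (Option Int × Option Int)) (lg rg : Option Int) (n : Int)
    (l' r' : Option Int) (n' : Int) (hm' : Bool) (rest' : List (Option Int × Option Int)),
    consumeL lg rg n rest = (l', r', n', hm', rest') →
    n ≤ n' ∧ rest'.length ≤ rest.length ∧ (hm' = true → l' ≠ none ∧ rest'.length < rest.length) := by
  intro rest
  induction rest with
  | nil =>
    intro lg rg n l' r' n' hm' rest' h
    simp only [consumeL, Prod.mk.injEq] at h
    obtain ⟨h1, h2, h3, h4, h5⟩ := h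
    subst h1; subst h2; subst h3; subst h4; subst h5
    simp
  | cons p rest ih =>
    intro lg rg n l' r' n' hm' rest' h
    obtain ⟨l, r⟩ := p
    simp only [consumeL] at h
    by_cases hl : l = none
    · rw [if_pos hl] at h
      have hrec := ih l r (n + 1) l' r' n' hm' rest' h
      refine ⟨by omega, by simp; omega, fun hhm => ⟨(hrec.2.2 hhm).1, by
        have := (hrec.2.2 hhm).2; simp; omega⟩⟩
    · rw [if_neg hl] at h
      simp only [Prod.mk.injEq] at h
      obtain ⟨h1, h2, h3, h4, h5⟩ := h
      subst h1; subst h2; subst h3; subst h4; subst h5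
      exact ⟨le_refl n, by simp, fun _ => ⟨hl, by simp⟩⟩

theorem consumeR_spec : ∀ (rest : List (Option Int × Option Int)) (lg rg : Option Int) (n : Int)
    (l' r' : Option Int) (n' : Int) (hm' : Bool) (rest' : List (Option Int × Option Int)),
    consumeR lg rg n rest = (l', r', n', hm', rest') →
    n ≤ n' ∧ rest'.length ≤ rest.length ∧ (hm' = true → r' ≠ none ∧ rest'.length < rest.length) := by
  intro rest
  induction rest with
  | nil =>
    intro lg rg n l' r' n' hm' rest' h
    simp only [consumeR, Prod.mk.injEq] at h
    obtain ⟨h1, h2, h3, h4, h5⟩ := h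
    subst h1; subst h2; subst h3; subst h4; subst h5
    simp
  | cons p rest ih =>
    intro lg rg n l' r' n' hm' rest' h
    obtain ⟨l, r⟩ := p
    simp only [consumeR] at h
    by_cases hr : r = none
    · rw [if_pos hr] at h
      have hrec := ih l r (n + 1) l' r' n' hm' rest' h
      refine ⟨by omega, by simp; omega, fun hhm => ⟨(hrec.2.2 hhm).1, by
        have := (hrec.2.2 hhm).2; simp; omega⟩⟩
    · rw [if_neg hr] at h
      simp only [Prod.mk.injEq] at h
      obtain ⟨h1, h2, h3, h4, h5⟩ := h
      subst h1; subst h2; subst h3; subst h4; subst h5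
      exact ⟨le_refl n, by simp, fun _ => ⟨hr, by simp⟩⟩

theorem consumeM_spec : ∀ (rest : List (Option Int × Option Int)) (lg rg : Option Int)
    (l' r' : Option Int) (n' : Int) (hm' : Bool) (rest' : List (Option Int × Option Int)),
    consumeM lg rg rest = (l', r', n', hm', rest') →
    n' = 0 ∧ rest'.length ≤ rest.length ∧
      (hm' = true → (l' = none ∨ r' = none) ∧ rest'.length < rest.length) := by
  intro rest
  induction rest with
  | nil =>
    intro lg rg l' r' n' hm' rest' h
    simp only [consumeM, Prod.mk.injEq] at h
    obtain ⟨h1, h2, h3, h4, h5⟩ := h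
    subst h1; subst h2; subst h3; subst h4; subst h5
    simp
  | cons p rest ih =>
    intro lg rg l' r' n' hm' rest' h
    obtain ⟨l, r⟩ := p
    simp only [consumeM] at h
    by_cases hu : l = none ∨ r = none
    · rw [if_pos hu] at h
      simp only [Prod.mk.injEq] at h
      obtain ⟨h1, h2, h3, h4, h5⟩ := h
      subst h1; subst h2; subst h3; subst h4; subst h5
      exact ⟨rfl, by simp, fun _ => ⟨hu, by simp⟩⟩
    · rw [if_neg hu] at h
      have hrec := ih l r l' r' n' hm' rest' h
      refine ⟨hrec.1, by have := hrec.2.1; simp; omega, fun hhm => ⟨(hrec.2.2 hhm).1, by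
        have := (hrec.2.2 hhm).2; simp; omega⟩⟩

theorem consumeA_len : ∀ (rest : List (Option Int × Option Int)) (lg rg : Option Int),
    (consumeA lg rg rest).2.2.2.2.length ≤ rest.length ∧
      ((consumeA lg rg rest).2.2.2.1 = true → (consumeA lg rg rest).2.2.2.2.length < rest.length) := by
  intro rest lg rg
  unfold consumeA
  split
  · have h := consumeL_spec rest lg rg 1 _ _ _ _ _ (rfl :
      consumeL lg rg 1 rest = ((consumeL lg rg 1 rest).1, (consumeL lg rg 1 rest).2.1,
        (consumeL lg rg 1 rest).2.2.1, (consumeL lg rg 1 rest).2.2.2.1, (consumeL lg rg 1 rest).2.2.2.2))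
    exact ⟨h.2.1, fun hhm => (h.2.2 hhm).2⟩
  split
  · have h := consumeR_spec rest lg rg 1 _ _ _ _ _ (rfl :
      consumeR lg rg 1 rest = ((consumeR lg rg 1 rest).1, (consumeR lg rg 1 rest).2.1,
        (consumeR lg rg 1 rest).2.2.1, (consumeR lg rg 1 rest).2.2.2.1, (consumeR lg rg 1 rest).2.2.2.2))
    exact ⟨h.2.1, fun hhm => (h.2.2 hhm).2⟩
  · have h := consumeM_spec rest lg rg _ _ _ _ _ (rfl :
      consumeM lg rg rest = ((consumeM lg rg rest).1, (consumeM lg rg rest).2.1,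
        (consumeM lg rg rest).2.2.1, (consumeM lg rg rest).2.2.2.1, (consumeM lg rg rest).2.2.2.2))
    exact ⟨h.2.1, fun hhm => (h.2.2 hhm).2⟩

-- A's while-loop (state: lg, rg, excess_tail, disjoint_num, has_more, remaining input)
def loopA (lg rg : Option Int) (excess_tail disjoint : Int) (has_more : Bool)
    (rest : List (Option Int × Option Int)) : Int × Int :=
  if has_more then
    let c := consumeA lg rg rest
    loopA c.1 c.2.1 c.2.2.1 (disjoint + excess_tail) c.2.2.2.1 c.2.2.2.2
  else (excess_tail, disjoint)
termination_by rest.length * 2 + (if has_more then 1 else 0)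
decreasing_by
  rcases consumeA_len rest lg rg with ⟨hle, hlt⟩
  rename_i hmt
  cases hhm : (consumeA lg rg rest).2.2.2.1 <;> simp [hhm, hmt] at * <;> omega

def count_excess_disjoint (pairs : List (Option Int × Option Int)) : Int × Int :=
  match pairs with
  | [] => (0, 0)
  | (lg, rg) :: rest =>
    let c := consumeA lg rg rest
    let p := loopA c.1 c.2.1 0 0 c.2.2.2.1 c.2.2.2.2
    (c.2.2.1 + p.1, p.2)

-- ===== PORT B =====
-- one step of B's for-loop; state: (side, cur, runs)
def stepB (st : Int × Int × List Int) (p : Option Int × Option Int) : Int × Int × List Int :=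
  if st.1 = 1 ∧ p.1 = none then (1, st.2.1 + 1, st.2.2)
  else if st.1 = 2 ∧ p.2 = none then (2, st.2.1 + 1, st.2.2)
  else
    let runs' := if st.1 ≠ 0 then st.2.2 ++ [st.2.1] else st.2.2
    if p.1 = none then (1, 1, runs')
    else if p.2 = none then (2, 1, runs')
    else (0, 0, runs')

def count_excess_disjoint_alt (pairs : List (Option Int × Option Int)) : Int × Int :=
  let st := pairs.foldl stepB (0, 0, [])
  let runs := if st.1 ≠ 0 then st.2.2 ++ [st.2.1] else st.2.2
  match runs with
  | [] => (0, 0)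
  | r0 :: rs =>
    let head := if (match pairs with | [] => false | (l, r) :: _ => l = none ∨ r = none)
                then r0 else 0
    let tail := if st.1 ≠ 0 then rs.getLastD r0 else 0
    if rs = [] ∧ head ≠ 0 ∧ tail ≠ 0 then (head, 0)
    else (head + tail, (r0 :: rs).sum - head - tail)

-- ===== PRECONDITION & SPEC =====
def Spec_count_excess_disjoint (pairs : List (Option Int × Option Int)) (out : Int × Int) : Prop := out = count_excess_disjoint_alt pairs
instance (pairs : List (Option Int × Option Int)) (out : Int × Int) : Decidable (Spec_count_excess_disjoint pairs out) := by unfold Spec_count_excess_disjoint; infer_instance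

-- ===== CLAIM (what is proved, stated in full; the proofs are below) =====
def Claim_equal_count_excess_disjoint : Prop := ∀ (pairs : List (Option Int × Option Int)), Dom_count_excess_disjoint pairs → Spec_count_excess_disjoint pairs (count_excess_disjoint pairs)

-- ===== LEMMAS AND PROOFS =====

-- the sequence of n_unpaired values the successive consume_ calls of A produce
def chainA (lg rg : Option Int) (hm : Bool) (rest : List (Option Int × Option Int)) : List Int :=
  if hm then
    let c := consumeA lg rg rest
    c.2.2.1 :: chainA c.1 c.2.1 c.2.2.2.1 c.2.2.2.2
  else []
termination_by rest.length * 2 + (if hm then 1 else 0)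
decreasing_by
  rcases consumeA_len rest lg rg with ⟨hle, hlt⟩
  rename_i hmt
  cases hhm : (consumeA lg rg rest).2.2.2.1 <;> simp [hhm, hmt] at * <;> omega

theorem chainA_true_ne_nil (lg rg : Option Int) (rest : List (Option Int × Option Int)) :
    chainA lg rg true rest ≠ [] := by
  rw [chainA]; simp

-- A's while loop in terms of the chain of consume_ results
theorem pair_chain_step (n et d : Int) (ch : List Int) :
    (ch.getLastD n, d + et + n + ch.sum - ch.getLastD n) =
      ((n :: ch).getLastD et, d + et + (n :: ch).sum - (n :: ch).getLastD et) := by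
  cases ch with
  | nil => simp [List.getLastD]
  | cons a l =>
    simp only [List.getLastD_cons, List.sum_cons, Prod.mk.injEq]
    exact ⟨trivial, by ring⟩

theorem loopA_chain_aux : ∀ (N : Nat) (lg rg : Option Int) (hm : Bool)
    (rest : List (Option Int × Option Int)),
    rest.length * 2 + (if hm then 1 else 0) ≤ N → ∀ (et d : Int),
    loopA lg rg et d hm rest =
      ((chainA lg rg hm rest).getLastD et,
       d + et + (chainA lg rg hm rest).sum - (chainA lg rg hm rest).getLastD et) := by
  intro N
  induction N with
  | zero =>
    intro lg rg hm rest hle et d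
    cases hm with
    | false => rw [loopA, chainA]; simp
    | true => simp at hle
  | succ N ih =>
    intro lg rg hm rest hle et d
    cases hm with
    | false => rw [loopA, chainA]; simp
    | true =>
      rw [loopA, chainA]
      rcases consumeA_len rest lg rg with ⟨hlen, hlt⟩
      have hle' : rest.length * 2 + 1 ≤ N + 1 := by simpa using hle
      have hmeas : (consumeA lg rg rest).2.2.2.2.length * 2 +
          (if (consumeA lg rg rest).2.2.2.1 then 1 else 0) ≤ N := by
        by_cases hhm : (consumeA lg rg rest).2.2.2.1 = true
        · have := hlt hhm
          rw [if_pos hhm]; omega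
        · rw [if_neg hhm]; omega
      rw [ih _ _ _ _ hmeas]
      simp only [reduceIte]
      exact pair_chain_step _ _ _ _

theorem loopA_chain : ∀ (lg rg : Option Int) (hm : Bool) (rest : List (Option Int × Option Int))
    (et d : Int),
    loopA lg rg et d hm rest =
      ((chainA lg rg hm rest).getLastD et,
       d + et + (chainA lg rg hm rest).sum - (chainA lg rg hm rest).getLastD et) :=
  fun lg rg hm rest et d => loopA_chain_aux _ lg rg hm rest le_rfl et d

-- the classification of a fresh unconsumed pair (B's else-branch target state)
def classifyB (l r : Option Int) : Int × Int :=
  if l = none then (1, 1) else if r = none then (2, 1) else (0, 0)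

theorem foldl_consumeL : ∀ (rest : List (Option Int × Option Int)) (lg rg : Option Int)
    (n cur : Int) (runs : List Int) (l' r' : Option Int) (n' : Int) (hm' : Bool)
    (rest' : List (Option Int × Option Int)),
    consumeL lg rg n rest = (l', r', n', hm', rest') →
    List.foldl stepB (1, cur, runs) rest =
      if hm' then List.foldl stepB (stepB (1, cur + (n' - n), runs) (l', r')) rest'
      else (1, cur + (n' - n), runs) := by
  intro rest
  induction rest with
  | nil =>
    intro lg rg n cur runs l' r' n' hm' rest' h
    simp only [consumeL, Prod.mk.injEq] at h
    obtain ⟨h1, h2, h3, h4, h5⟩ := h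
    subst h1; subst h2; subst h3; subst h4; subst h5
    simp
  | cons p rest ih =>
    intro lg rg n cur runs l' r' n' hm' rest' h
    obtain ⟨l, r⟩ := p
    simp only [consumeL] at h
    by_cases hl : l = none
    · rw [if_pos hl] at h
      have hstep : stepB (1, cur, runs) (l, r) = (1, cur + 1, runs) := by
        simp [stepB, hl]
      rw [List.foldl_cons, hstep, ih l r (n + 1) (cur + 1) runs l' r' n' hm' rest' h]
      have harith : cur + 1 + (n' - (n + 1)) = cur + (n' - n) := by ring
      rw [harith]
    · rw [if_neg hl] at h
      simp only [Prod.mk.injEq] at h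
      obtain ⟨h1, h2, h3, h4, h5⟩ := h
      subst h1; subst h2; subst h3; subst h4; subst h5
      simp

theorem foldl_consumeR : ∀ (rest : List (Option Int × Option Int)) (lg rg : Option Int)
    (n cur : Int) (runs : List Int) (l' r' : Option Int) (n' : Int) (hm' : Bool)
    (rest' : List (Option Int × Option Int)),
    consumeR lg rg n rest = (l', r', n', hm', rest') →
    List.foldl stepB (2, cur, runs) rest =
      if hm' then List.foldl stepB (stepB (2, cur + (n' - n), runs) (l', r')) rest'
      else (2, cur + (n' - n), runs) := by
  intro rest
  induction rest with
  | nil =>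
    intro lg rg n cur runs l' r' n' hm' rest' h
    simp only [consumeR, Prod.mk.injEq] at h
    obtain ⟨h1, h2, h3, h4, h5⟩ := h
    subst h1; subst h2; subst h3; subst h4; subst h5
    simp
  | cons p rest ih =>
    intro lg rg n cur runs l' r' n' hm' rest' h
    obtain ⟨l, r⟩ := p
    simp only [consumeR] at h
    by_cases hr : r = none
    · rw [if_pos hr] at h
      have hstep : stepB (2, cur, runs) (l, r) = (2, cur + 1, runs) := by
        simp [stepB, hr]
      rw [List.foldl_cons, hstep, ih l r (n + 1) (cur + 1) runs l' r' n' hm' rest' h]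
      have harith : cur + 1 + (n' - (n + 1)) = cur + (n' - n) := by ring
      rw [harith]
    · rw [if_neg hr] at h
      simp only [Prod.mk.injEq] at h
      obtain ⟨h1, h2, h3, h4, h5⟩ := h
      subst h1; subst h2; subst h3; subst h4; subst h5
      simp

theorem foldl_consumeM : ∀ (rest : List (Option Int × Option Int)) (lg rg : Option Int)
    (runs : List Int) (l' r' : Option Int) (n' : Int) (hm' : Bool)
    (rest' : List (Option Int × Option Int)),
    consumeM lg rg rest = (l', r', n', hm', rest') →
    List.foldl stepB (0, 0, runs) rest =
      if hm' then List.foldl stepB (stepB (0, 0, runs) (l', r')) rest'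
      else (0, 0, runs) := by
  intro rest
  induction rest with
  | nil =>
    intro lg rg runs l' r' n' hm' rest' h
    simp only [consumeM, Prod.mk.injEq] at h
    obtain ⟨h1, h2, h3, h4, h5⟩ := h
    subst h1; subst h2; subst h3; subst h4; subst h5
    simp
  | cons p rest ih =>
    intro lg rg runs l' r' n' hm' rest' h
    obtain ⟨l, r⟩ := p
    simp only [consumeM] at h
    by_cases hu : l = none ∨ r = none
    · rw [if_pos hu] at h
      simp only [Prod.mk.injEq] at h
      obtain ⟨h1, h2, h3, h4, h5⟩ := h
      subst h1; subst h2; subst h3; subst h4; subst h5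
      simp
    · rw [if_neg hu] at h
      push Not at hu
      have hstep : stepB (0, 0, runs) (l, r) = (0, 0, runs) := by
        simp [stepB, hu.1, hu.2]
      rw [List.foldl_cons, hstep, ih l r runs l' r' n' hm' rest' h]

-- generic list facts used by the final arithmetic
theorem sum_filter_ne_zero : ∀ (l : List Int), (l.filter (fun x => x ≠ 0)).sum = l.sum := by
  intro l
  induction l with
  | nil => simp
  | cons a l ih =>
    by_cases ha : a = 0
    · subst ha
      rw [List.filter_cons, if_neg (by simp), ih, List.sum_cons]
      ring
    · rw [List.filter_cons, if_pos (by simp [ha]), List.sum_cons, List.sum_cons, ih]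

theorem getLastD_irrel : ∀ (l : List Int) (a b : Int), l ≠ [] → l.getLastD a = l.getLastD b := by
  intro l a b hl
  cases l with
  | nil => exact absurd rfl hl
  | cons x l => simp [List.getLastD_eq_getLast?, List.getLast?_cons]

theorem getLastD_filter : ∀ (l : List Int) (d : Int), l.getLastD 0 ≠ 0 →
    (l.filter (fun x => x ≠ 0)).getLastD d = l.getLastD 0 := by
  intro l
  induction l with
  | nil => intro d h; exact absurd rfl h
  | cons a l ih =>
    intro d h
    rw [List.getLastD_cons] at h ⊢
    by_cases hln : l = []
    · subst hln
      simp only [List.getLastD] at h ⊢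
      simp [h]
    · have hswap : l.getLastD a = l.getLastD 0 := getLastD_irrel l a 0 hln
      rw [hswap] at h ⊢
      by_cases ha : a = 0
      · rw [List.filter_cons, if_neg (by simp [ha])]
        exact ih d h
      · rw [List.filter_cons, if_pos (by simp [ha]), List.getLastD_cons]
        exact ih a h

theorem filter_nil_all_zero : ∀ (l : List Int), l.filter (fun x => x ≠ 0) = [] →
    l.sum = 0 ∧ l.getLastD 0 = 0 := by
  intro l
  induction l with
  | nil => intro _; simp
  | cons a l ih =>
    intro h
    simp only [List.filter_cons] at h
    by_cases ha : a = 0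
    · subst ha
      simp only [ne_eq, not_true_eq_false, decide_false] at h
      rcases ih h with ⟨hs, hg⟩
      refine ⟨by simp [hs], ?_⟩
      rw [List.getLastD_cons]
      by_cases hln : l = []
      · subst hln; simp [List.getLastD]
      · rw [getLastD_irrel l 0 0 hln]
        exact hg
    · simp [ha] at h

-- one stepB application at a pair that closes / opens a run
theorem stepB_close1 (cur : Int) (runs : List Int) (l r : Option Int) (hl : l ≠ none) :
    stepB (1, cur, runs) (l, r) = ((classifyB l r).1, (classifyB l r).2, runs ++ [cur]) := by
  by_cases hr : r = none <;> simp [stepB, classifyB, hl, hr]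

theorem stepB_close2 (cur : Int) (runs : List Int) (l r : Option Int) (hr : r ≠ none) :
    stepB (2, cur, runs) (l, r) = ((classifyB l r).1, (classifyB l r).2, runs ++ [cur]) := by
  by_cases hl : l = none <;> simp [stepB, classifyB, hl, hr]

theorem stepB_open (runs : List Int) (l r : Option Int) :
    stepB (0, 0, runs) (l, r) = ((classifyB l r).1, (classifyB l r).2, runs) := by
  by_cases hl : l = none <;> by_cases hr : r = none <;> simp [stepB, classifyB, hl, hr]

-- the simulation: B's fold from a freshly classified pair computes the nonzero chain entries,
-- and its final side is nonzero exactly when the chain ends in a nonzero entry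
theorem chain_sim_aux : ∀ (N : Nat), ∀ (rest : List (Option Int × Option Int)),
    rest.length ≤ N → ∀ (l r : Option Int) (runs : List Int),
    (if (List.foldl stepB ((classifyB l r).1, (classifyB l r).2, runs) rest).1 ≠ 0 then
        (List.foldl stepB ((classifyB l r).1, (classifyB l r).2, runs) rest).2.2 ++
          [(List.foldl stepB ((classifyB l r).1, (classifyB l r).2, runs) rest).2.1]
      else (List.foldl stepB ((classifyB l r).1, (classifyB l r).2, runs) rest).2.2) =
        runs ++ (chainA l r true rest).filter (fun x => x ≠ 0) ∧
      ((List.foldl stepB ((classifyB l r).1, (classifyB l r).2, runs) rest).1 ≠ 0 ↔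
        (chainA l r true rest).getLastD 0 ≠ 0) := by
  intro N
  induction N using Nat.strong_induction_on with
  | _ N ih =>
    intro rest hN l r runs
    obtain ⟨l1, r1, n1, hm1, rest1, hc⟩ :
        ∃ a b n h t, consumeA l r rest = (a, b, n, h, t) := ⟨_, _, _, _, _, rfl⟩
    have hchain : chainA l r true rest = n1 :: chainA l1 r1 hm1 rest1 := by
      rw [chainA]
      simp only [reduceIte, hc]
    rw [hchain]
    by_cases hl : l = none
    · -- left-side run
      rw [consumeA, if_pos hl] at hc
      have hspec := consumeL_spec rest l r 1 l1 r1 n1 hm1 rest1 hc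
      have hn1 : n1 ≠ 0 := by have := hspec.1; omega
      have hcls : classifyB l r = (1, 1) := by simp [classifyB, hl]
      have hfold := foldl_consumeL rest l r 1 1 runs l1 r1 n1 hm1 rest1 hc
      have harith : (1 : Int) + (n1 - 1) = n1 := by ring
      rw [harith] at hfold
      rw [hcls]
      cases hm1 with
      | false =>
        rw [if_neg (by simp)] at hfold
        rw [hfold, chainA]
        simp [hn1, List.getLastD]
      | true =>
        rcases hspec.2.2 rfl with ⟨hl1, hlen⟩
        rw [if_pos rfl, stepB_close1 n1 runs l1 r1 hl1] at hfold
        rw [hfold]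
        rcases ih rest1.length (lt_of_lt_of_le hlen hN) rest1 le_rfl l1 r1 (runs ++ [n1])
          with ⟨ihr, ihflag⟩
        refine ⟨?_, ?_⟩
        · rw [ihr, List.filter_cons, if_pos (by simp [hn1]), List.append_assoc]
          rfl
        · rw [ihflag, List.getLastD_cons,
            getLastD_irrel _ n1 0 (chainA_true_ne_nil l1 r1 rest1)]
    · by_cases hr : r = none
      · -- right-side run
        rw [consumeA, if_neg hl, if_pos hr] at hc
        have hspec := consumeR_spec rest l r 1 l1 r1 n1 hm1 rest1 hc
        have hn1 : n1 ≠ 0 := by have := hspec.1; omega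
        have hcls : classifyB l r = (2, 1) := by simp [classifyB, hl, hr]
        have hfold := foldl_consumeR rest l r 1 1 runs l1 r1 n1 hm1 rest1 hc
        have harith : (1 : Int) + (n1 - 1) = n1 := by ring
        rw [harith] at hfold
        rw [hcls]
        cases hm1 with
        | false =>
          rw [if_neg (by simp)] at hfold
          rw [hfold, chainA]
          simp [hn1, List.getLastD]
        | true =>
          rcases hspec.2.2 rfl with ⟨hr1, hlen⟩
          rw [if_pos rfl, stepB_close2 n1 runs l1 r1 hr1] at hfold
          rw [hfold]
          rcases ih rest1.length (lt_of_lt_of_le hlen hN) rest1 le_rfl l1 r1 (runs ++ [n1])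
            with ⟨ihr, ihflag⟩
          refine ⟨?_, ?_⟩
          · rw [ihr, List.filter_cons, if_pos (by simp [hn1]), List.append_assoc]
            rfl
          · rw [ihflag, List.getLastD_cons,
              getLastD_irrel _ n1 0 (chainA_true_ne_nil l1 r1 rest1)]
      · -- matched separator scan
        rw [consumeA, if_neg hl, if_neg hr] at hc
        have hspec := consumeM_spec rest l r l1 r1 n1 hm1 rest1 hc
        have hn1 : n1 = 0 := hspec.1
        subst hn1
        have hcls : classifyB l r = (0, 0) := by simp [classifyB, hl, hr]
        have hfold := foldl_consumeM rest l r runs l1 r1 0 hm1 rest1 hc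
        rw [hcls]
        cases hm1 with
        | false =>
          rw [if_neg (by simp)] at hfold
          rw [hfold, chainA]
          simp [List.getLastD]
        | true =>
          rcases hspec.2.2 rfl with ⟨_, hlen⟩
          rw [if_pos rfl, stepB_open runs l1 r1] at hfold
          rw [hfold]
          rcases ih rest1.length (lt_of_lt_of_le hlen hN) rest1 le_rfl l1 r1 runs
            with ⟨ihr, ihflag⟩
          refine ⟨?_, ?_⟩
          · rw [ihr, List.filter_cons, if_neg (by simp)]
          · rw [ihflag, List.getLastD_cons]

theorem chain_sim : ∀ (rest : List (Option Int × Option Int)) (l r : Option Int)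
    (runs : List Int),
    (if (List.foldl stepB ((classifyB l r).1, (classifyB l r).2, runs) rest).1 ≠ 0 then
        (List.foldl stepB ((classifyB l r).1, (classifyB l r).2, runs) rest).2.2 ++
          [(List.foldl stepB ((classifyB l r).1, (classifyB l r).2, runs) rest).2.1]
      else (List.foldl stepB ((classifyB l r).1, (classifyB l r).2, runs) rest).2.2) =
        runs ++ (chainA l r true rest).filter (fun x => x ≠ 0) ∧
      ((List.foldl stepB ((classifyB l r).1, (classifyB l r).2, runs) rest).1 ≠ 0 ↔
        (chainA l r true rest).getLastD 0 ≠ 0) :=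
  fun rest l r runs => chain_sim_aux rest.length rest le_rfl l r runs

-- the first consume_ call counts at least one gene iff the first pair is unpaired
theorem consumeA_first_flag : ∀ (rest : List (Option Int × Option Int)) (l r l1 r1 : Option Int)
    (x0 : Int) (hm1 : Bool) (rest1 : List (Option Int × Option Int)),
    consumeA l r rest = (l1, r1, x0, hm1, rest1) → ((l = none ∨ r = none) ↔ x0 ≠ 0) := by
  intro rest l r l1 r1 x0 hm1 rest1 h
  by_cases hl : l = none
  · rw [consumeA, if_pos hl] at h
    have := (consumeL_spec rest l r 1 l1 r1 x0 hm1 rest1 h).1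
    exact ⟨fun _ => by omega, fun _ => Or.inl hl⟩
  · by_cases hr : r = none
    · rw [consumeA, if_neg hl, if_pos hr] at h
      have := (consumeR_spec rest l r 1 l1 r1 x0 hm1 rest1 h).1
      exact ⟨fun _ => by omega, fun _ => Or.inr hr⟩
    · rw [consumeA, if_neg hl, if_neg hr] at h
      have := (consumeM_spec rest l r l1 r1 x0 hm1 rest1 h).1
      subst this
      simp [hl, hr]

theorem main_cons : ∀ (l0 r0 : Option Int) (rest : List (Option Int × Option Int)),
    count_excess_disjoint ((l0, r0) :: rest) = count_excess_disjoint_alt ((l0, r0) :: rest) := by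
  intro l0 r0 rest
  obtain ⟨l1, r1, x0, hm1, rest1, hc⟩ :
      ∃ a b n h t, consumeA l0 r0 rest = (a, b, n, h, t) := ⟨_, _, _, _, _, rfl⟩
  have hzc : chainA l0 r0 true rest = x0 :: chainA l1 r1 hm1 rest1 := by
    rw [chainA]
    simp only [reduceIte, hc]
  have hA : count_excess_disjoint ((l0, r0) :: rest) =
      (x0 + (chainA l1 r1 hm1 rest1).getLastD 0,
       (chainA l1 r1 hm1 rest1).sum - (chainA l1 r1 hm1 rest1).getLastD 0) := by
    simp only [count_excess_disjoint]
    rw [hc, loopA_chain]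
    norm_num
  rcases chain_sim rest l0 r0 [] with ⟨hruns, hflag⟩
  rw [hzc] at hruns hflag
  simp only [List.nil_append] at hruns
  have hx0flag : (l0 = none ∨ r0 = none) ↔ x0 ≠ 0 :=
    consumeA_first_flag rest l0 r0 l1 r1 x0 hm1 rest1 hc
  rw [hA]
  simp only [count_excess_disjoint_alt, List.foldl_cons, stepB_open]
  rw [hruns]
  rw [List.getLastD_cons] at hflag
  simp only [hflag, decide_eq_true_iff, hx0flag]
  cases hf : List.filter (fun x => decide (x ≠ 0)) (x0 :: chainA l1 r1 hm1 rest1) with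
  | nil =>
    rw [List.filter_cons] at hf
    by_cases hx0 : x0 = 0
    · rw [if_neg (by simp [hx0])] at hf
      rcases filter_nil_all_zero _ hf with ⟨hsum, hlast⟩
      rw [hsum, hlast, hx0]
      norm_num
    · rw [if_pos (by simp [hx0])] at hf
      exact absurd hf (by simp)
  | cons f0 fs =>
    dsimp only
    by_cases hx0 : x0 = 0
    · subst hx0
      rw [List.filter_cons, if_neg (by simp)] at hf
      have h0 : ¬((0 : Int) ≠ 0) := by simp
      rw [if_neg (by simp)]
      by_cases hfl : (chainA l1 r1 hm1 rest1).getLastD 0 ≠ 0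
      · rw [if_pos hfl, if_neg h0]
        have htail : fs.getLastD f0 = (chainA l1 r1 hm1 rest1).getLastD 0 := by
          have := getLastD_filter (chainA l1 r1 hm1 rest1) f0 hfl
          rw [hf, List.getLastD_cons] at this
          exact this
        have hsum : (f0 :: fs).sum = (chainA l1 r1 hm1 rest1).sum := by
          rw [← hf]
          exact sum_filter_ne_zero _
        rw [htail, hsum]
        simp only [Prod.mk.injEq]
        exact ⟨by norm_num, by omega⟩
      · rw [if_neg hfl, if_neg h0]
        have hfl' : (chainA l1 r1 hm1 rest1).getLastD 0 = 0 := by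
          by_contra hcon
          exact hfl hcon
        have hsum : (f0 :: fs).sum = (chainA l1 r1 hm1 rest1).sum := by
          rw [← hf]
          exact sum_filter_ne_zero _
        rw [hfl', hsum]
        simp only [Prod.mk.injEq]
        exact ⟨by norm_num, by omega⟩
    · rw [List.filter_cons, if_pos (by simp [hx0])] at hf
      injection hf with hf0 hfs
      subst hf0
      by_cases hfl : (chainA l1 r1 hm1 rest1).getLastD x0 ≠ 0
      · by_cases hfs0 : fs = []
        · subst hfs0
          rw [if_pos ⟨rfl, by rw [if_pos hx0]; exact hx0, by rw [if_pos hfl]; exact hx0⟩]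
          rw [if_pos hx0]
          rcases filter_nil_all_zero _ hfs with ⟨hsum, hlast⟩
          rw [hsum, hlast]
          norm_num
        · rw [if_neg (fun hcon => hfs0 hcon.1)]
          rw [if_pos hx0, if_pos hfl]
          have hchne : chainA l1 r1 hm1 rest1 ≠ [] := by
            intro hcon
            rw [hcon] at hfs
            exact hfs0 hfs.symm
          have htail : fs.getLastD x0 = (chainA l1 r1 hm1 rest1).getLastD x0 := by
            have hzfl : (x0 :: chainA l1 r1 hm1 rest1).getLastD 0 ≠ 0 := by
              rw [List.getLastD_cons]
              exact hfl
            have := getLastD_filter (x0 :: chainA l1 r1 hm1 rest1) x0 hzfl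
            rw [List.filter_cons, if_pos (by simp [hx0]), hfs, List.getLastD_cons,
              List.getLastD_cons] at this
            exact this
          have hirrel : (chainA l1 r1 hm1 rest1).getLastD x0 =
              (chainA l1 r1 hm1 rest1).getLastD 0 := getLastD_irrel _ x0 0 hchne
          rw [htail, hirrel, List.sum_cons, ← hfs, sum_filter_ne_zero _]
          simp only [Prod.mk.injEq]
          exact ⟨by norm_num, by omega⟩
      · have hfl' : (chainA l1 r1 hm1 rest1).getLastD x0 = 0 := by
          by_contra hcon
          exact hfl hcon
        have hchne : chainA l1 r1 hm1 rest1 ≠ [] := by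
          intro hcon
          rw [hcon] at hfl'
          simp only [List.getLastD] at hfl'
          exact hx0 hfl'
        have hlast0 : (chainA l1 r1 hm1 rest1).getLastD 0 = 0 := by
          rw [← getLastD_irrel _ x0 0 hchne]
          exact hfl'
        rw [if_neg (fun hcon => hcon.2.2 (by rw [if_neg hfl]))]
        rw [if_pos hx0, if_neg hfl]
        rw [List.sum_cons, ← hfs, sum_filter_ne_zero _, hlast0]
        simp only [Prod.mk.injEq]
        exact ⟨by norm_num, by omega⟩

-- ===== VERDICT (by name: the statement is the Claim_ definition above) =====
theorem count_excess_disjoint_spec : Claim_equal_count_excess_disjoint := by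
  intro pairs _hdom
  unfold Spec_count_excess_disjoint
  cases pairs with
  | nil => rfl
  | cons p rest =>
    obtain ⟨l0, r0⟩ := p
    exact main_cons l0 r0 rest
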